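-- pv_equiv track=rewrite | github.com/miliar/Code_Jam_Webscraper | solutions_python/Problem_181/1021.py | lw
-- ===== SOURCE A (Python) =====
-- def lw(s):
--     last = s[0]
--
--     for i in s[1:]:
--         if i >= last[0]:
--             last = i + last
--         else:
--             last = last + i
--     return last
-- ===== SOURCE B (Python) =====
-- def lw(s):
--     ms = [s[0]]
--     for c in s[1:]:
--         ms.append(c if c > ms[-1] else ms[-1])
--     front = [c for c, m in zip(s, ms) if c == m]
--     back = [c for c, m in zip(s, ms) if c != m]
--     return ''.join(reversed(front)) + ''.join(back)
-- ===== Notes on version B (the rewrite author's own statement) =====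
-- stated objective: faster
-- what changed: B is staged: it first tabulates the prefix-maximum array, then partitions characters by equality with that table (a char is a prefix maximum iff it equals its table entry) via two comprehensions, and joins reverse(front)+back once, instead of A's single greedy pass that repeatedly prepends/appends to one growing string.
import Mathlib
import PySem

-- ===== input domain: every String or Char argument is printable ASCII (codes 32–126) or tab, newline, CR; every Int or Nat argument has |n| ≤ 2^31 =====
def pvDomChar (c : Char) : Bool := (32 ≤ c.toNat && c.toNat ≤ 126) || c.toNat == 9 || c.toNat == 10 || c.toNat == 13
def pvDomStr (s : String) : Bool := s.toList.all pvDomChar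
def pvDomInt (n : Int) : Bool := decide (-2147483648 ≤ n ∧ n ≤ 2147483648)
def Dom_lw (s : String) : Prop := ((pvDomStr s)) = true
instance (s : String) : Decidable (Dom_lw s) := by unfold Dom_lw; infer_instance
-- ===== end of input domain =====

-- B replaces A's greedy prepend/append on one growing string by staged passes:
-- tabulate prefix maxima, partition by equality with the table, join once (return value only).

-- ===== PORT A =====
-- A's loop state `last` is the growing string; prepend when i >= last[0], else append.
def lwStepA (last : List Char) (i : Char) : List Char :=
  match last with
  | [] => []            -- unreachable: last starts nonempty and never shrinks
  | c :: _ => if c ≤ i then i :: last else last ++ [i]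

def lw (s : String) : String :=
  match s.toList with
  | [] => ""            -- Python raises IndexError on s[0]; excluded by Pre_lw
  | c :: rest => String.ofList (rest.foldl lwStepA [c])

-- ===== PORT B =====
-- B: prefix-max table ms (ms.append(c if c > ms[-1] else ms[-1])), then partition by c == m.
def lw_alt (s : String) : String :=
  match s.toList with
  | [] => ""            -- Python raises IndexError on s[0]; excluded by Pre_lw
  | c :: rest =>
    let ms := rest.foldl
      (fun acc ch => acc ++ [if acc.getLastD c < ch then ch else acc.getLastD c]) [c]
    let pairs := (c :: rest).zip ms
    let front := (pairs.filter (fun p => p.1 == p.2)).map Prod.fst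
    let back  := (pairs.filter (fun p => p.1 != p.2)).map Prod.fst
    String.ofList (front.reverse ++ back)

-- ===== PRECONDITION & SPEC =====
-- Pre_ excludes only the empty string, on which both Pythons raise IndexError at s[0].
def Pre_lw (s : String) : Prop := s ≠ ""
instance (s : String) : Decidable (Pre_lw s) := by unfold Pre_lw; infer_instance
def pvWitness_lw : String := "bacd"

def Spec_lw (s : String) (out : String) : Prop := out = lw_alt s
instance (s : String) (out : String) : Decidable (Spec_lw s out) := by unfold Spec_lw; infer_instance

-- ===== CLAIM =====
def Claim_equal_lw : Prop := ∀ (s : String), Dom_lw s → Pre_lw s → Spec_lw s (lw s)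

-- ===== LEMMAS AND PROOFS =====

-- Proof-side abstract loop state: (running max, front chars, back chars).
def lwStepB (p : Char × List Char × List Char) (i : Char) : Char × List Char × List Char :=
  if p.1 ≤ i then (i, p.2.1 ++ [i], p.2.2) else (p.1, p.2.1, p.2.2 ++ [i])

-- Tail of the prefix-max table after seed m.
def tailMs (m : Char) : List Char → List Char
  | [] => []
  | i :: t => (if m < i then i else m) :: tailMs (if m < i then i else m) t

-- A's fold vs the abstract (max, front, back) fold.
theorem lw_loop_eq (rest : List Char) : ∀ (m c : Char) (front back : List Char),
    (front.reverse ++ c :: back).head? = some m →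
    rest.foldl lwStepA (front.reverse ++ c :: back) =
      (let st := rest.foldl lwStepB (m, front, back); st.2.1.reverse ++ c :: st.2.2) := by
  induction rest with
  | nil => intro m c front back _; simp
  | cons i rest ih =>
    intro m c front back hhead
    have hne : front.reverse ++ c :: back ≠ [] := by simp
    obtain ⟨x, t, hxt⟩ := List.exists_cons_of_ne_nil hne
    have hx : x = m := by rw [hxt] at hhead; simpa using hhead
    subst hx
    simp only [List.foldl_cons]
    by_cases h : x ≤ i
    · have hA : lwStepA (front.reverse ++ c :: back) i = i :: (front.reverse ++ c :: back) := by
        have e : lwStepA (x :: t) i = if x ≤ i then i :: x :: t else x :: t ++ [i] := rfl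
        rw [hxt, e, if_pos h, ← hxt]
      have hB : lwStepB (x, front, back) i = (i, front ++ [i], back) := by
        simp [lwStepB, h]
      rw [hA]
      have : i :: (front.reverse ++ c :: back) = (front ++ [i]).reverse ++ c :: back := by simp
      rw [this, hB]
      exact ih i c (front ++ [i]) back (by simp)
    · have hA : lwStepA (front.reverse ++ c :: back) i = (front.reverse ++ c :: back) ++ [i] := by
        have e : lwStepA (x :: t) i = if x ≤ i then i :: x :: t else x :: t ++ [i] := rfl
        rw [hxt, e, if_neg h, ← hxt]
      have hB : lwStepB (x, front, back) i = (x, front, back ++ [i]) := by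
        simp [lwStepB, h]
      rw [hA]
      have : (front.reverse ++ c :: back) ++ [i] = front.reverse ++ c :: (back ++ [i]) := by simp
      rw [this, hB]
      refine ih x c front (back ++ [i]) ?_
      have : (front.reverse ++ c :: (back ++ [i])).head? = (front.reverse ++ c :: back).head? := by
        cases hf : front.reverse with
        | nil => simp
        | cons y ys => simp
      rw [this]; exact hhead

-- B's ms-fold builds seed :: tailMs seed rest (the table grows at the end; last entry is the max).
theorem ms_fold_eq (c : Char) (rest : List Char) : ∀ (acc : List Char) (m : Char),
    acc.getLast? = some m →
    rest.foldl (fun acc ch => acc ++ [if acc.getLastD c < ch then ch else acc.getLastD c]) acc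
      = acc ++ tailMs m rest := by
  induction rest with
  | nil => intro acc m _; simp [tailMs]
  | cons i t ih =>
    intro acc m hlast
    have hd : acc.getLastD c = m := by
      simp [List.getLastD_eq_getLast?, hlast]
    simp only [List.foldl_cons, hd]
    rw [ih (acc ++ [if m < i then i else m]) (if m < i then i else m) (by simp)]
    simp [tailMs]

-- The abstract fold's front/back are exactly the equality partition against tailMs.
theorem stB_eq (rest : List Char) : ∀ (m : Char) (F B : List Char),
    (rest.foldl lwStepB (m, F, B)).2 =
      (F ++ ((rest.zip (tailMs m rest)).filter (fun p => p.1 == p.2)).map Prod.fst,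
       B ++ ((rest.zip (tailMs m rest)).filter (fun p => p.1 != p.2)).map Prod.fst) := by
  induction rest with
  | nil => intro m F B; simp [tailMs]
  | cons i t ih =>
    intro m F B
    simp only [List.foldl_cons, tailMs, List.zip_cons_cons]
    by_cases h : m ≤ i
    · have hv : (if m < i then i else m) = i := by
        by_cases h' : m < i
        · simp [h']
        · have : m = i := le_antisymm h (not_lt.mp h')
          simp [this]
      rw [hv]
      have hB : lwStepB (m, F, B) i = (i, F ++ [i], B) := by simp [lwStepB, h]
      rw [hB, ih]
      simp
    · have hlt : i < m := not_le.mp h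
      have hv : (if m < i then i else m) = m := by simp [not_lt.mpr (le_of_lt hlt)]
      rw [hv]
      have hB : lwStepB (m, F, B) i = (m, F, B ++ [i]) := by simp [lwStepB, h]
      rw [hB, ih]
      simp [ne_of_lt hlt, List.append_assoc]

-- ===== VERDICT =====
theorem lw_spec : Claim_equal_lw := by
  intro s _ hpre
  unfold Spec_lw lw lw_alt
  cases hs : s.toList with
  | nil =>
    have : s = "" := by rw [← String.ofList_toList (s := s), hs]
    exact absurd this hpre
  | cons c rest =>
    have hA := lw_loop_eq rest c c [] [] (by simp)
    simp only [List.reverse_nil, List.nil_append] at hA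
    have hms := ms_fold_eq c rest [c] c (by simp)
    have hst := stB_eq rest c [] []
    simp only [List.nil_append] at hst
    have h1 := congrArg Prod.fst hst
    have h2 := congrArg Prod.snd hst
    simp only at h1 h2
    show String.ofList (List.foldl lwStepA [c] rest) =
      String.ofList ((List.map Prod.fst (List.filter (fun p => p.1 == p.2)
        ((c :: rest).zip (List.foldl (fun acc ch => acc ++ [if acc.getLastD c < ch then ch else acc.getLastD c]) [c] rest)))).reverse ++
        List.map Prod.fst (List.filter (fun p => p.1 != p.2)
        ((c :: rest).zip (List.foldl (fun acc ch => acc ++ [if acc.getLastD c < ch then ch else acc.getLastD c]) [c] rest))))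
    rw [hms, hA, h1, h2]
    simp
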